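-- pv_equiv track=rewrite | github.com/blzzua/codewars | 6-kyu/sum_of_integer_combinations.py | find
-- ===== SOURCE A (Python) =====
-- from itertools import combinations_with_replacement
--
-- def find(arr,n):
--     res = 0
--     max_size = min((n//min(arr), len(arr))) +1
--     for i in range(1, max_size):
--         for comb in combinations_with_replacement(arr, i):
--             if sum(comb) == n:
--                 res += 1
--     return res
-- ===== SOURCE B (Python) =====
-- def find(arr, n):
--     # DP coin-change count over positions: dp[k][t] = number of index-multisets
--     # of size k over the positions processed so far whose values sum to t.
--     K = min(n // min(arr), len(arr))
--     if K < 1: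
--         return 0
--     dp = [{} for _ in range(K + 1)]
--     dp[0][0] = 1
--     for v in arr:
--         for k in range(1, K + 1):
--             prev = dp[k - 1]
--             cur = dp[k]
--             for t, c in list(prev.items()):
--                 cur[t + v] = cur.get(t + v, 0) + c
--     return sum(dp[k].get(n, 0) for k in range(1, K + 1))
-- ===== Notes on version B (the rewrite author's own statement) =====
-- stated objective: alternative
-- what changed: Replaces the enumeration of all combinations_with_replacement of every size up to the cap by a coin-change dynamic program over (selection size, partial sum) dictionaries, one pass per array element.
import Mathlib
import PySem

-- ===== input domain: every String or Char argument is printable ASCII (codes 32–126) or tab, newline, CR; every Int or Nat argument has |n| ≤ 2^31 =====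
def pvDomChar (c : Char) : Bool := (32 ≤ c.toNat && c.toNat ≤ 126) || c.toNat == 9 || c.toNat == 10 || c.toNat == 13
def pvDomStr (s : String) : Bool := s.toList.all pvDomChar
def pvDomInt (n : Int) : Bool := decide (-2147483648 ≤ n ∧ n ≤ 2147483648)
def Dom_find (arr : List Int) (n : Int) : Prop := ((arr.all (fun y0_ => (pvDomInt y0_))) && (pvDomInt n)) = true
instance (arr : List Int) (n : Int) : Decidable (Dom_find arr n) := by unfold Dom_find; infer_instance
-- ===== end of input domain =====

-- B replaces A's enumeration of all combinations_with_replacement by a coin-change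
-- style dynamic program over (selection size, partial sum) dictionaries.

-- ===== PORT A =====
-- helper: itertools.combinations_with_replacement(pool, r) as the list of chosen
-- value-tuples, in lexicographic index order (exact for A's use: it only counts them)
def cwr : List Int → Nat → List (List Int)
  | _, 0 => [[]]
  | [], _ + 1 => []
  | x :: rest, k + 1 => ((cwr (x :: rest) k).map (fun c => x :: c)) ++ cwr rest (k + 1)
termination_by xs k => (xs.length, k)

def find (arr : List Int) (n : Int) : Int :=
  match PySem.List.min? arr (fun x => x) with
  | none => 0  -- unreachable under Pre_find: Python's min([]) raises ValueError
  | some m =>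
    -- Python raises ZeroDivisionError when m = 0; Pre_find excludes that
    let maxSize := min (PySem.Int.floordiv n m) (arr.length : Int) + 1
    (PySem.List.pyRange 1 maxSize 1).foldl (fun res i =>
      (cwr arr i.toNat).foldl (fun res comb => if comb.sum == n then res + 1 else res) res) 0

-- ===== PORT B =====
-- helper: the body of B's 'for v in arr' loop (the k-loop updating dp[k] from dp[k-1])
def bStep (K : Int) (dp : List (PySem.Dict Int Int)) (v : Int) : List (PySem.Dict Int Int) :=
  (PySem.List.pyRange 1 (K + 1) 1).foldl (fun dp k =>
    let prev := PySem.List.pyGetD dp (k - 1) PySem.Dict.empty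
    let cur := PySem.List.pyGetD dp k PySem.Dict.empty
    PySem.List.pySetD dp k
      (prev.items.foldl (fun cur p => cur.insert (p.1 + v) (cur.getD (p.1 + v) 0 + p.2)) cur)) dp

def find_alt (arr : List Int) (n : Int) : Int :=
  match PySem.List.min? arr (fun x => x) with
  | none => 0  -- unreachable under Pre_find: Python's min([]) raises ValueError
  | some m =>
    let K := min (PySem.Int.floordiv n m) (arr.length : Int)
    if K < 1 then 0
    else
      let dp0 := PySem.List.pySetD
        ((PySem.List.pyRange 0 (K + 1) 1).map (fun _ => (PySem.Dict.empty : PySem.Dict Int Int)))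
        0 (PySem.Dict.empty.insert 0 1)
      let dp := arr.foldl (bStep K) dp0
      (PySem.List.pyRange 1 (K + 1) 1).foldl
        (fun acc k => acc + (PySem.List.pyGetD dp k PySem.Dict.empty).getD n 0) 0

-- ===== PRECONDITION & SPEC =====
-- Pre_find excludes exactly the inputs where Python A raises: min([]) is a ValueError
-- on the empty list, and n // min(arr) is a ZeroDivisionError when min(arr) = 0.
def Pre_find (arr : List Int) (n : Int) : Prop :=
  arr ≠ [] ∧ ¬ ((0 : Int) ∈ arr ∧ ∀ x ∈ arr, 0 ≤ x)
instance (arr : List Int) (n : Int) : Decidable (Pre_find arr n) := by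
  unfold Pre_find; infer_instance

def pvWitness_find : List Int × Int := ([1, 2], 3)

def Spec_find (arr : List Int) (n : Int) (out : Int) : Prop := out = find_alt arr n
instance (arr : List Int) (n : Int) (out : Int) : Decidable (Spec_find arr n out) := by
  unfold Spec_find; infer_instance

-- ===== CLAIM (what is proved, stated in full; the proofs are below) =====
def Claim_equal_find : Prop :=
  ∀ (arr : List Int) (n : Int), Dom_find arr n → Pre_find arr n → Spec_find arr n (find arr n)

-- ===== LEMMAS AND PROOFS =====

-- mcount xs k t = number of size-k index-multisets over xs whose values sum to t;
-- both programs' results are characterised by it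
def mcount : List Int → Nat → Int → Int
  | _, 0, t => if t = 0 then 1 else 0
  | [], _ + 1, _ => 0
  | x :: rest, k + 1, t => mcount (x :: rest) k (t - x) + mcount rest (k + 1) t
termination_by xs k _ => (xs.length, k)

theorem mcount_zero (xs : List Int) (t : Int) : mcount xs 0 t = if t = 0 then 1 else 0 := by
  cases xs <;> simp [mcount]

theorem mcount_nil_succ (k : Nat) (t : Int) : mcount [] (k + 1) t = 0 := by
  simp [mcount]

theorem mcount_cons_succ (x : Int) (rest : List Int) (k : Nat) (t : Int) :
    mcount (x :: rest) (k + 1) t = mcount (x :: rest) k (t - x) + mcount rest (k + 1) t := by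
  simp [mcount]

theorem mcount_append_singleton (v : Int) (k : Nat) (p : List Int) (t : Int) :
    mcount (p ++ [v]) (k + 1) t = mcount p (k + 1) t + mcount (p ++ [v]) k (t - v) := by
  induction k using Nat.strong_induction_on generalizing p t with
  | _ k ih =>
    induction p generalizing t with
    | nil =>
      cases k with
      | zero => simp [mcount]
      | succ k =>
        simp only [List.nil_append]
        rw [mcount_cons_succ, mcount_nil_succ, mcount_cons_succ]
        simp [mcount_nil_succ]
    | cons x p ihp =>
      cases k with
      | zero =>
        simp only [List.cons_append]
        rw [mcount_cons_succ, mcount_cons_succ, ihp]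
        simp only [mcount_zero]
        ring
      | succ k =>
        simp only [List.cons_append]
        rw [mcount_cons_succ]
        rw [show x :: (p ++ [v]) = (x :: p) ++ [v] from rfl,
            ih k (Nat.lt_succ_self k) (x :: p) (t - x)]
        rw [ihp]
        rw [show (x :: p) ++ [v] = x :: (p ++ [v]) from rfl, mcount_cons_succ (k := k + 1)]
        rw [mcount_cons_succ (rest := p ++ [v]) (k := k)]
        have h2 : t - x - v = t - v - x := by ring
        rw [h2]
        ring

theorem cwr_countP (xs : List Int) (k : Nat) (n : Int) :
    ((cwr xs k).countP (fun c => c.sum == n) : Int) = mcount xs k n := by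
  induction xs, k using cwr.induct generalizing n with
  | case1 xs =>
    simp [cwr, mcount]
    split <;> simp_all [eq_comm]
  | case2 k =>
    simp [cwr, mcount]
  | case3 x rest k ih1 ih2 =>
    simp only [cwr, mcount, List.countP_append, List.countP_map]
    push_cast
    rw [← ih1 (n - x), ← ih2 n]
    congr 2
    apply List.countP_congr
    intro c _
    simp only [Function.comp, List.sum_cons, beq_iff_eq]
    constructor <;> (intro h ; omega)


theorem fold_shift (v s : Int) : ∀ (its : List (Int × Int)) (cur : PySem.Dict Int Int),
    (its.map Prod.fst).Nodup →
    (its.foldl (fun cur p => cur.insert (p.1 + v) (cur.getD (p.1 + v) 0 + p.2)) cur).getD s 0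
      = cur.getD s 0 + (PySem.Dict.mk its).getD (s - v) 0 := by
  intro its
  induction its with
  | nil =>
    intro cur _
    simp [PySem.Dict.getD_eq_get?_getD, PySem.Dict.get?]
  | cons p rest ih =>
    intro cur hnd
    simp only [List.map_cons, List.nodup_cons] at hnd
    obtain ⟨hp, hrest⟩ := hnd
    simp only [List.foldl_cons]
    rw [ih _ hrest]
    by_cases hs : s = p.1 + v
    · rw [PySem.Dict.getD_insert, if_pos hs]
      have h1 : (PySem.Dict.mk rest).getD (s - v) 0 = 0 := by
        apply PySem.Dict.getD_of_not_contains
        rw [PySem.Dict.contains_eq_decide_mem_keys]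
        simp only [decide_eq_false_iff_not, PySem.Dict.keys_mk]
        have : s - v = p.1 := by omega
        rw [this]; exact hp
      have h2 : (PySem.Dict.mk (p :: rest)).getD (s - v) 0 = p.2 := by
        rw [PySem.Dict.getD_eq_get?_getD]
        have : PySem.Dict.mk (p :: rest) = PySem.Dict.mk ((p.1, p.2) :: rest) := by simp
        rw [this, PySem.Dict.get?_mk_cons]
        have : s - v = p.1 := by omega
        simp [this]
      rw [h1, h2, hs]
      ring
    · rw [PySem.Dict.getD_insert, if_neg hs]
      have h2 : (PySem.Dict.mk (p :: rest)).getD (s - v) 0 = (PySem.Dict.mk rest).getD (s - v) 0 := by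
        rw [PySem.Dict.getD_eq_get?_getD, PySem.Dict.getD_eq_get?_getD]
        have : PySem.Dict.mk (p :: rest) = PySem.Dict.mk ((p.1, p.2) :: rest) := by simp
        rw [this, PySem.Dict.get?_mk_cons]
        have hne : (p.1 == s - v) = false := by
          simp only [beq_eq_false_iff_ne, ne_eq]
          omega
        simp [hne]
      rw [h2]


theorem dict_mk_items (d : PySem.Dict Int Int) : PySem.Dict.mk d.items = d := by cases d; rfl

theorem getD_set {α : Type} (l : List α) (m i : Nat) (v d : α) (hm : m < l.length) :
    (l.set m v).getD i d = if i = m then v else l.getD i d := by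
  by_cases hi : i = m
  · subst hi; simp [List.getD, List.getElem?_set, hm]
  · simp [List.getD, List.getElem?_set, hi, Ne.symm hi]

def DPInv (K : Nat) (p : List Int) (dp : List (PySem.Dict Int Int)) : Prop :=
  ∀ i, i ≤ K → (dp.getD i PySem.Dict.empty).keys.Nodup ∧
    ∀ t, (dp.getD i PySem.Dict.empty).getD t 0 = mcount p i t

theorem bStep_aux (K : Nat) (v : Int) (p : List Int) (dp : List (PySem.Dict Int Int))
    (hlen : dp.length = K + 1) (h : DPInv K p dp) :
    ∀ j, j ≤ K →
      ((PySem.List.pyRange 1 ((j : Int) + 1) 1).foldl (fun dp k =>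
        let prev := PySem.List.pyGetD dp (k - 1) PySem.Dict.empty
        let cur := PySem.List.pyGetD dp k PySem.Dict.empty
        PySem.List.pySetD dp k
          (prev.items.foldl (fun cur p => cur.insert (p.1 + v) (cur.getD (p.1 + v) 0 + p.2)) cur)) dp).length = K + 1 ∧
      ∀ i, i ≤ K →
        ((((PySem.List.pyRange 1 ((j : Int) + 1) 1).foldl (fun dp k =>
        let prev := PySem.List.pyGetD dp (k - 1) PySem.Dict.empty
        let cur := PySem.List.pyGetD dp k PySem.Dict.empty
        PySem.List.pySetD dp k
          (prev.items.foldl (fun cur p => cur.insert (p.1 + v) (cur.getD (p.1 + v) 0 + p.2)) cur)) dp).getD i PySem.Dict.empty).keys.Nodup) ∧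
        ∀ t, (((PySem.List.pyRange 1 ((j : Int) + 1) 1).foldl (fun dp k =>
        let prev := PySem.List.pyGetD dp (k - 1) PySem.Dict.empty
        let cur := PySem.List.pyGetD dp k PySem.Dict.empty
        PySem.List.pySetD dp k
          (prev.items.foldl (fun cur p => cur.insert (p.1 + v) (cur.getD (p.1 + v) 0 + p.2)) cur)) dp).getD i PySem.Dict.empty).getD t 0
          = if i ≤ j then mcount (p ++ [v]) i t else mcount p i t := by
  intro j
  induction j with
  | zero =>
    intro _
    rw [show ((0 : Nat) : Int) + 1 = 1 by norm_num, PySem.List.pyRange_one_eq_nil (le_refl 1)]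
    simp only [List.foldl_nil]
    refine ⟨hlen, fun i hi => ⟨(h i hi).1, fun t => ?_⟩⟩
    rcases Nat.eq_zero_or_pos i with h0 | h0
    · subst h0
      simp only [Nat.le_refl, if_pos]
      rw [(h 0 (Nat.zero_le K)).2 t, mcount_zero, mcount_zero]
    · rw [if_neg (by omega)]
      exact (h i hi).2 t
  | succ j ihj =>
    intro hj1
    have hj : j ≤ K := by omega
    obtain ⟨ihlen, ihlev⟩ := ihj hj
    have hsplit : PySem.List.pyRange 1 (((j + 1 : Nat) : Int) + 1) 1
        = PySem.List.pyRange 1 ((j : Int) + 1) 1 ++ [(j : Int) + 1] := by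
      rw [show (((j + 1 : Nat) : Int) + 1) = ((j : Int) + 1) + 1 by push_cast; ring]
      exact PySem.List.pyRange_one_succ_right (by omega)
    rw [hsplit, List.foldl_append, List.foldl_cons, List.foldl_nil]
    set dpj := (PySem.List.pyRange 1 ((j : Int) + 1) 1).foldl (fun dp k =>
        let prev := PySem.List.pyGetD dp (k - 1) PySem.Dict.empty
        let cur := PySem.List.pyGetD dp k PySem.Dict.empty
        PySem.List.pySetD dp k
          (prev.items.foldl (fun cur p => cur.insert (p.1 + v) (cur.getD (p.1 + v) 0 + p.2)) cur)) dp with hdpj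
    simp only []
    have e1 : (j : Int) + 1 - 1 = ((j : Nat) : Int) := by ring
    have e2 : (j : Int) + 1 = (((j + 1 : Nat) : Nat) : Int) := by push_cast; ring
    rw [e1, e2, PySem.List.pyGetD_natCast, PySem.List.pyGetD_natCast, PySem.List.pySetD_natCast]
    set prev := dpj.getD j PySem.Dict.empty with hprev
    set cur := dpj.getD (j + 1) PySem.Dict.empty with hcur
    set newd := prev.items.foldl (fun cur p => cur.insert (p.1 + v) (cur.getD (p.1 + v) 0 + p.2)) cur with hnewd
    have hnewlen : (dpj.set (j + 1) newd).length = K + 1 := by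
      rw [List.length_set]; exact ihlen
    refine ⟨hnewlen, fun i hi => ?_⟩
    have hget : ∀ i : Nat, ((dpj.set (j + 1) newd).getD i PySem.Dict.empty)
        = if i = j + 1 then newd else dpj.getD i PySem.Dict.empty := by
      intro i
      exact getD_set dpj (j + 1) i newd PySem.Dict.empty (by omega)
    have hprevnd : (prev.items.map Prod.fst).Nodup := (ihlev j hj).1
    have hnewnd : newd.keys.Nodup :=
      PySem.Dict.nodup_keys_foldl_insert_key prev.items (fun p => p.1 + v)
        (fun cur p => cur.getD (p.1 + v) 0 + p.2) cur (ihlev (j + 1) hj1).1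
    have hnewval : ∀ s, newd.getD s 0 = mcount (p ++ [v]) (j + 1) s := by
      intro s
      rw [hnewd, fold_shift v s prev.items cur hprevnd, dict_mk_items]
      have h1 : cur.getD s 0 = mcount p (j + 1) s := by
        rw [(ihlev (j + 1) hj1).2 s, if_neg (by omega)]
      have h2 : prev.getD (s - v) 0 = mcount (p ++ [v]) j (s - v) := by
        rw [(ihlev j hj).2 (s - v), if_pos (le_refl j)]
      rw [h1, h2, mcount_append_singleton]
    constructor
    · rw [hget i]
      split
      · exact hnewnd
      · exact (ihlev i hi).1
    · intro t
      rw [hget i]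
      by_cases hij : i = j + 1
      · rw [if_pos hij, hij, if_pos (le_refl _)]
        exact hnewval t
      · rw [if_neg hij, (ihlev i hi).2 t]
        by_cases hle : i ≤ j
        · rw [if_pos hle, if_pos (by omega)]
        · rw [if_neg hle, if_neg (by omega)]

theorem bStep_inv (K : Nat) (v : Int) (p : List Int) (dp : List (PySem.Dict Int Int))
    (hlen : dp.length = K + 1) (h : DPInv K p dp) :
    (bStep (K : Int) dp v).length = K + 1 ∧ DPInv K (p ++ [v]) (bStep (K : Int) dp v) := by
  obtain ⟨h1, h2⟩ := bStep_aux K v p dp hlen h K (le_refl K)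
  refine ⟨by rw [bStep]; exact h1, fun i hi => ?_⟩
  obtain ⟨hnd, hval⟩ := h2 i hi
  refine ⟨by rw [bStep]; exact hnd, fun t => ?_⟩
  rw [bStep]
  rw [hval t, if_pos hi]

theorem fold_inv (K : Nat) : ∀ (l p : List Int) (dp : List (PySem.Dict Int Int)),
    dp.length = K + 1 → DPInv K p dp →
    (l.foldl (bStep (K : Int)) dp).length = K + 1 ∧ DPInv K (p ++ l) (l.foldl (bStep (K : Int)) dp) := by
  intro l
  induction l with
  | nil => intro p dp hlen h; simpa using ⟨hlen, h⟩
  | cons v l ihl =>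
    intro p dp hlen h
    obtain ⟨hlen', h'⟩ := bStep_inv K v p dp hlen h
    obtain ⟨hlen'', h''⟩ := ihl (p ++ [v]) _ hlen' h'
    rw [List.foldl_cons]
    refine ⟨hlen'', ?_⟩
    rwa [List.append_assoc, List.singleton_append] at h''

theorem getD_map_const (l : List Int) (i : Nat) (c d : PySem.Dict Int Int) (h : i < l.length) :
    ((l.map (fun _ => c)).getD i d) = c := by
  simp [List.getD, List.getElem?_map, h, List.getElem?_eq_getElem]

theorem dp0_inv (Kn : Nat) :
    (PySem.List.pySetD ((PySem.List.pyRange 0 ((Kn : Int) + 1) 1).map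
        (fun _ => (PySem.Dict.empty : PySem.Dict Int Int))) 0
        (PySem.Dict.empty.insert 0 1)).length = Kn + 1 ∧
    DPInv Kn [] (PySem.List.pySetD ((PySem.List.pyRange 0 ((Kn : Int) + 1) 1).map
        (fun _ => (PySem.Dict.empty : PySem.Dict Int Int))) 0
        (PySem.Dict.empty.insert 0 1)) := by
  have hbaselen : ((PySem.List.pyRange 0 ((Kn : Int) + 1) 1).map
      (fun _ => (PySem.Dict.empty : PySem.Dict Int Int))).length = Kn + 1 := by
    rw [List.length_map, PySem.List.length_pyRange_one]
    omega
  have hset : PySem.List.pySetD ((PySem.List.pyRange 0 ((Kn : Int) + 1) 1).map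
      (fun _ => (PySem.Dict.empty : PySem.Dict Int Int))) 0 (PySem.Dict.empty.insert 0 1)
      = ((PySem.List.pyRange 0 ((Kn : Int) + 1) 1).map
      (fun _ => (PySem.Dict.empty : PySem.Dict Int Int))).set 0 (PySem.Dict.empty.insert 0 1) := by
    have := PySem.List.pySetD_of_nonneg (xs := (PySem.List.pyRange 0 ((Kn : Int) + 1) 1).map
      (fun _ => (PySem.Dict.empty : PySem.Dict Int Int))) (i := 0) (v := PySem.Dict.empty.insert 0 1) (by omega)
    simpa using this
  constructor
  · rw [hset, List.length_set]; exact hbaselen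
  · intro i hi
    rw [hset, getD_set _ _ _ _ _ (by rw [hbaselen]; omega)]
    by_cases h0 : i = 0
    · rw [if_pos h0, h0]
      refine ⟨PySem.Dict.nodup_keys_insert _ _ _ PySem.Dict.nodup_keys_empty, fun t => ?_⟩
      rw [PySem.Dict.getD_insert, mcount_zero]
      by_cases ht : t = 0 <;> simp [ht, PySem.Dict.getD_empty]
    · rw [if_neg h0, getD_map_const _ _ _ _ (by rw [PySem.List.length_pyRange_one]; omega)]
      refine ⟨by simp [PySem.Dict.keys_empty], fun t => ?_⟩
      rw [PySem.Dict.getD_empty]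
      obtain ⟨i', rfl⟩ : ∃ i', i = i' + 1 := ⟨i - 1, by omega⟩
      simp [mcount]

theorem find_eq (arr : List Int) (n : Int) : find arr n = find_alt arr n := by
  unfold find find_alt
  cases hmin : PySem.List.min? arr (fun x => x) with
  | none => rfl
  | some m =>
    simp only []
    set K := min (PySem.Int.floordiv n m) (arr.length : Int) with hK
    by_cases hK1 : K < 1
    · rw [if_pos hK1, PySem.List.pyRange_one_eq_nil (by omega : K + 1 ≤ 1)]
      rfl
    · rw [if_neg hK1]
      set Kn := K.toNat with hKn
      have hKcast : K = (Kn : Int) := by omega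
      rw [hKcast]
      set dp0 := PySem.List.pySetD
        ((PySem.List.pyRange 0 ((Kn : Int) + 1) 1).map (fun _ => (PySem.Dict.empty : PySem.Dict Int Int)))
        0 (PySem.Dict.empty.insert 0 1) with hdp0
      set dp := arr.foldl (bStep (Kn : Int)) dp0 with hdp
      obtain ⟨hlen0, hinv0⟩ := dp0_inv Kn
      obtain ⟨hlen, hinv⟩ := fold_inv Kn arr [] dp0 hlen0 hinv0
      rw [show ([] : List Int) ++ arr = arr from rfl] at hinv
      -- A side: inner loop is a countP
      have hA : ∀ (l : List (List Int)) (res : Int),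
          l.foldl (fun res comb => if comb.sum == n then res + 1 else res) res
            = res + (l.countP (fun c => c.sum == n) : Int) :=
        fun l res => PySem.List.foldl_if_add_one _ l res
      have hfunA : (fun (res : Int) (i : Int) =>
            (cwr arr i.toNat).foldl (fun res comb => if comb.sum == n then res + 1 else res) res)
          = fun res i => res + ((cwr arr i.toNat).countP (fun c => c.sum == n) : Int) := by
        funext res i
        exact hA _ res
      rw [hfunA, PySem.List.foldl_add, PySem.List.foldl_add]
      apply congrArg (fun z => 0 + z)
      apply congrArg List.sum
      refine List.map_congr_left ?_
      intro k hk
      rw [PySem.List.mem_pyRange_one] at hk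
      have hk0 : k = ((k.toNat : Nat) : Int) := by omega
      have hkK : k.toNat ≤ Kn := by omega
      rw [hk0, PySem.List.pyGetD_natCast]
      rw [(hinv k.toNat hkK).2 n]
      rw [← cwr_countP arr k.toNat n]
      rfl

-- ===== VERDICT (by name: the statement is the Claim_ definition above) =====
theorem find_spec : Claim_equal_find := by
  intro arr n _ _
  unfold Spec_find
  exact find_eq arr n
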